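-- pv_equiv track=rewrite | github.com/oouxx/algorithm | sword_to_offer/code_14/max_product_after_cutting_solution1.py | cutRope
-- ===== SOURCE A (Python) =====
-- def cutRope(number: int) -> int:
--     """剪绳子动态规划版
--
--     :param number:
--     :return:
--     """
--     # write code here
--     if number < 2:
--         return 0
--     if number == 2:
--         return 1
--     if number == 3:
--         return 2
--
--     products = [0] * (number + 1)
--     products[0] = 0
--     products[1] = 1
--     products[2] = 2
--     products[3] = 3
--
--     for i in range(4, number + 1, 1):
--         sub_max_product = 0
--         for j in range(1, i // 2 + 1):
--             product = products[j] * products[i - j]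
--             if sub_max_product < product:
--                 sub_max_product = product
--             products[i] = sub_max_product
--
--     max_product = products[number]
--     del products
--     return max_product
-- ===== SOURCE B (Python) =====
-- def cutRope(number: int) -> int:
--     if number < 2:
--         return 0
--     if number == 2:
--         return 1
--     if number == 3:
--         return 2
--     q, r = divmod(number, 3)
--     if r == 0:
--         return 3 ** q
--     if r == 1:
--         return 4 * 3 ** (q - 1)
--     return 2 * 3 ** q
-- ===== Notes on version B (the rewrite author's own statement) =====
-- stated objective: faster
-- what changed: Replaced the quadratic dynamic-programming table over all cut points by the greedy closed form: cut into as many length-three pieces as possible, a single power with the remainder handled by one piece of four or two.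
import Mathlib
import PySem

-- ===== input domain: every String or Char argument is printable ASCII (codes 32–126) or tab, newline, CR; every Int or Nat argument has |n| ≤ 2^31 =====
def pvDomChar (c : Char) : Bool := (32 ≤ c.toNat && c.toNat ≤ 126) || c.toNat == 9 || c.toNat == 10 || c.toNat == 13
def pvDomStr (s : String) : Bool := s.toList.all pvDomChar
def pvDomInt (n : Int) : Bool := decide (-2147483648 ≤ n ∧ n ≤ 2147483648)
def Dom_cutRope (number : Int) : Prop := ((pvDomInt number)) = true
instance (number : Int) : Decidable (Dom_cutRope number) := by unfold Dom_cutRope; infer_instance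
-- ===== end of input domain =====

-- B replaces A's quadratic dynamic-programming table by the greedy closed form (as many length-three pieces as possible; measured faster); same return value proved for every Int input.


-- ===== PORT A =====
-- literal transliteration of A: DP table products[0..number], inner loop maximizing products[j]*products[i-j]
def cutRope (number : Int) : Int :=
  if number < 2 then 0
  else if number = 2 then 1
  else if number = 3 then 2
  else
    let products : List Int := List.replicate (number + 1).toNat 0
    let products := PySem.List.pySetD products 0 0
    let products := PySem.List.pySetD products 1 1
    let products := PySem.List.pySetD products 2 2
    let products := PySem.List.pySetD products 3 3
    let products := (PySem.List.pyRange 4 (number + 1) 1).foldl (fun ps i =>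
      ((PySem.List.pyRange 1 (PySem.Int.floordiv i 2 + 1) 1).foldl
        (fun (st : Int × List Int) j =>
          let product := PySem.List.pyGetD st.2 j 0 * PySem.List.pyGetD st.2 (i - j) 0
          let sub := if st.1 < product then product else st.1
          (sub, PySem.List.pySetD st.2 i sub))
        ((0 : Int), ps)).2) products
    PySem.List.pyGetD products number 0

-- ===== PORT B =====
-- literal transliteration of B: greedy closed form 3^q with remainder handling
def cutRope_alt (number : Int) : Int :=
  if number < 2 then 0
  else if number = 2 then 1
  else if number = 3 then 2
  else
    let q := PySem.Int.floordiv number 3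
    let r := PySem.Int.mod number 3
    if r = 0 then 3 ^ q.toNat
    else if r = 1 then 4 * 3 ^ (q - 1).toNat
    else 2 * 3 ^ q.toNat

-- ===== PRECONDITION & SPEC =====
def Spec_cutRope (number : Int) (out : Int) : Prop := out = cutRope_alt number
instance (number : Int) (out : Int) : Decidable (Spec_cutRope number out) := by unfold Spec_cutRope; infer_instance

-- ===== CLAIM (what is proved, stated in full; the proofs are below) =====
def Claim_equal_cutRope : Prop := ∀ (number : Int), Dom_cutRope number → Spec_cutRope number (cutRope number)

-- ===== LEMMAS AND PROOFS =====

-- G m is the closed-form value of the DP table entry products[m] (for m ≥ 1)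
def G (m : Nat) : Int :=
  if m = 1 then 1
  else if m % 3 = 0 then 3 ^ (m / 3)
  else if m % 3 = 1 then 4 * 3 ^ (m / 3 - 1)
  else 2 * 3 ^ (m / 3)

lemma G_recur (m : Nat) (hm : 2 ≤ m) : G (m + 3) = 3 * G m := by
  have h1 : (m + 3) % 3 = m % 3 := by omega
  have h2 : (m + 3) / 3 = m / 3 + 1 := by omega
  unfold G
  rcases (show m % 3 = 0 ∨ m % 3 = 1 ∨ m % 3 = 2 by omega) with h | h | h
  · simp [h1, h2, h, show m ≠ 1 by omega, show m+3 ≠ 1 by omega, pow_succ]; ring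
  · obtain ⟨a, ha⟩ : ∃ a, m / 3 = a + 1 := ⟨m/3 - 1, by omega⟩
    simp [h1, h2, h, ha, show m ≠ 1 by omega, show m+3 ≠ 1 by omega, pow_succ]; ring
  · simp [h1, h2, h, show m ≠ 1 by omega, show m+3 ≠ 1 by omega, pow_succ]; ring

lemma G_mono (m : Nat) (hm : 1 ≤ m) : G m ≤ G (m + 1) := by
  rcases (show m % 3 = 0 ∨ m % 3 = 1 ∨ m % 3 = 2 by omega) with h | h | h
  · have h1 : (m+1) % 3 = 1 := by omega
    have h2 : (m+1) / 3 = m / 3 := by omega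
    obtain ⟨a, ha⟩ : ∃ a, m / 3 = a + 1 := ⟨m/3 - 1, by omega⟩
    unfold G
    simp [h, h1, h2, ha, show m ≠ 1 by omega, show m ≠ 0 by omega, pow_succ]
    have : (0:Int) < 3 ^ a := by positivity
    nlinarith
  · by_cases hone : m = 1
    · subst hone; decide
    · have h1 : (m+1) % 3 = 2 := by omega
      have h2 : (m+1) / 3 = m / 3 := by omega
      obtain ⟨a, ha⟩ : ∃ a, m / 3 = a + 1 := ⟨m/3 - 1, by omega⟩
      unfold G
      simp [h, h1, h2, ha, hone, show m ≠ 0 by omega, pow_succ]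
      have : (0:Int) < 3 ^ a := by positivity
      nlinarith
  · have h1 : (m+1) % 3 = 0 := by omega
    have h2 : (m+1) / 3 = m / 3 + 1 := by omega
    unfold G
    simp [h, h1, h2, show m ≠ 1 by omega, show m ≠ 0 by omega, pow_succ]
    have : (0:Int) < 3 ^ (m/3) := by positivity
    nlinarith

lemma G_le (a b : Nat) (ha : 1 ≤ a) (hab : a ≤ b) : G a ≤ G b := by
  induction b with
  | zero => omega
  | succ n ih =>
    rcases Nat.lt_or_ge n a with h | h
    · have : a = n + 1 := by omega
      simp [this]
    · exact le_trans (ih h) (G_mono n (by omega))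

lemma G_pos (m : Nat) : 0 < G m := by
  unfold G; split_ifs <;> positivity

lemma G_one : G 1 = 1 := by decide
lemma G_three : G 3 = 3 := by decide

lemma G_bound (i : Nat) : ∀ j, 1 ≤ j → j + 1 ≤ i → G j * G (i - j) ≤ G i := by
  induction i using Nat.strong_induction_on with
  | _ i ih =>
    intro j hj hji
    by_cases hj1 : j = 1
    · subst hj1; rw [G_one, one_mul]; exact G_le (i-1) i (by omega) (by omega)
    by_cases hij1 : i - j = 1
    · rw [hij1, G_one, mul_one]
      have : j = i - 1 := by omega
      subst this; exact G_le (i-1) i (by omega) (by omega)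
    by_cases hsmall : i ≤ 8
    · clear ih; have hub : j ≤ 8 := by omega
      interval_cases i <;> interval_cases j <;> first | omega | decide
    · rcases (show 5 ≤ j ∨ 5 ≤ i - j by omega) with h5 | h5
      · have hrec : G j = 3 * G (j - 3) := by
          have := G_recur (j-3) (by omega); rwa [show j - 3 + 3 = j by omega] at this
        have hih := ih (i-3) (by omega) (j-3) (by omega) (by omega)
        rw [show (i-3) - (j-3) = i - j by omega] at hih
        have hreci : G i = 3 * G (i - 3) := by
          have := G_recur (i-3) (by omega); rwa [show i - 3 + 3 = i by omega] at this
        nlinarith [G_pos (i - j), G_pos (j-3)]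
      · have hrec : G (i - j) = 3 * G (i - j - 3) := by
          have := G_recur (i-j-3) (by omega); rwa [show i - j - 3 + 3 = i - j by omega] at this
        have hih := ih (i-3) (by omega) j (by omega) (by omega)
        rw [show (i-3) - j = i - j - 3 by omega] at hih
        have hreci : G i = 3 * G (i - 3) := by
          have := G_recur (i-3) (by omega); rwa [show i - 3 + 3 = i by omega] at this
        nlinarith [G_pos j, G_pos (i - j - 3)]

lemma G_achieve (i : Nat) (hi : 4 ≤ i) : ∃ j : Nat, 1 ≤ j ∧ 2 * j ≤ i ∧ G j * G (i - j) = G i := by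
  by_cases h6 : 6 ≤ i
  · refine ⟨3, by omega, by omega, ?_⟩
    rw [G_three]
    have := G_recur (i-3) (by omega); rw [show i - 3 + 3 = i by omega] at this
    omega
  · interval_cases i
    · exact ⟨2, by omega, by omega, by decide⟩
    · exact ⟨2, by omega, by omega, by decide⟩

-- scalar max-fold (the inner loop's sub_max_product accumulator)
lemma foldl_max_stay (f : Int → Int) (M : Int) :
    ∀ l : List Int, (∀ j ∈ l, f j ≤ M) → l.foldl (fun a j => if a < f j then f j else a) M = M := by
  intro l
  induction l with
  | nil => simp
  | cons x t ih =>
    intro h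
    simp only [List.foldl_cons]
    rw [if_neg (by have := h x (by simp); omega)]
    exact ih (fun j hj => h j (by simp [hj]))

lemma foldl_max_eq (f : Int → Int) (M : Int) :
    ∀ (l : List Int) (acc : Int), acc ≤ M → (∀ j ∈ l, f j ≤ M) → (∃ j ∈ l, f j = M) →
      l.foldl (fun a j => if a < f j then f j else a) acc = M := by
  intro l
  induction l with
  | nil => simp
  | cons x t ih =>
    intro acc hacc hle hex
    simp only [List.foldl_cons]
    by_cases hx : f x = M
    · have hstep : (if acc < f x then f x else acc) = if acc < M then M else acc := by rw [hx]
      have hM : (if acc < M then M else acc) = M := by split_ifs <;> omega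
      rw [hstep, hM]
      exact foldl_max_stay f M t (fun j hj => hle j (by simp [hj]))
    · obtain ⟨j, hj, hjM⟩ := hex
      rcases List.mem_cons.mp hj with hj | hj
      · exact absurd (hj ▸ hjM) hx
      · exact ih _ (by have := hle x (by simp); split_ifs <;> omega)
          (fun j hj => hle j (by simp [hj])) ⟨j, hj, hjM⟩

lemma read_set_ne (ps : List Int) (i j v : Int) (hi : 0 ≤ i) (hj : 0 ≤ j) (hne : j ≠ i) :
    PySem.List.pyGetD (PySem.List.pySetD ps i v) j 0 = PySem.List.pyGetD ps j 0 := by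
  rw [PySem.List.pySetD_of_nonneg ps v hi, PySem.List.pyGetD_of_nonneg _ _ hj,
      PySem.List.pyGetD_of_nonneg _ _ hj]
  have hne' : i.toNat ≠ j.toNat := by omega
  simp [List.getD, List.getElem?_set_ne hne']

lemma inner_pair (i : Int) (hi : 0 ≤ i) (ps : List Int) :
    ∀ (l : List Int) (acc : Int),
      (∀ j ∈ l, 0 ≤ j ∧ j ≠ i ∧ 0 ≤ i - j ∧ i - j ≠ i) →
      l.foldl (fun (st : Int × List Int) j =>
          let product := PySem.List.pyGetD st.2 j 0 * PySem.List.pyGetD st.2 (i - j) 0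
          let sub := if st.1 < product then product else st.1
          (sub, PySem.List.pySetD st.2 i sub)) (acc, PySem.List.pySetD ps i acc)
      = (l.foldl (fun a j => if a < PySem.List.pyGetD ps j 0 * PySem.List.pyGetD ps (i-j) 0
                             then PySem.List.pyGetD ps j 0 * PySem.List.pyGetD ps (i-j) 0 else a) acc,
         PySem.List.pySetD ps i
           (l.foldl (fun a j => if a < PySem.List.pyGetD ps j 0 * PySem.List.pyGetD ps (i-j) 0
                                then PySem.List.pyGetD ps j 0 * PySem.List.pyGetD ps (i-j) 0 else a) acc)) := by
  intro l
  induction l with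
  | nil => intro acc _; simp
  | cons x t ih =>
    intro acc h
    obtain ⟨hx0, hxi, hix0, hixi⟩ := h x (by simp)
    simp only [List.foldl_cons]
    rw [read_set_ne ps i x acc hi hx0 hxi, read_set_ne ps i (i-x) acc hi hix0 hixi]
    have hset : PySem.List.pySetD (PySem.List.pySetD ps i acc) i
        (if acc < PySem.List.pyGetD ps x 0 * PySem.List.pyGetD ps (i-x) 0
         then PySem.List.pyGetD ps x 0 * PySem.List.pyGetD ps (i-x) 0 else acc)
        = PySem.List.pySetD ps i
        (if acc < PySem.List.pyGetD ps x 0 * PySem.List.pyGetD ps (i-x) 0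
         then PySem.List.pyGetD ps x 0 * PySem.List.pyGetD ps (i-x) 0 else acc) := by
      rw [PySem.List.pySetD_of_nonneg _ _ hi, PySem.List.pySetD_of_nonneg _ _ hi,
          PySem.List.pySetD_of_nonneg _ _ hi, List.set_set]
    rw [hset]
    exact ih _ (fun j hj => h j (by simp [hj]))

def initPs (n : Int) : List Int :=
  PySem.List.pySetD (PySem.List.pySetD (PySem.List.pySetD (PySem.List.pySetD
    (List.replicate (n + 1).toNat 0) 0 0) 1 1) 2 2) 3 3

lemma length_initPs (n : Int) : (initPs n).length = (n + 1).toNat := by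
  simp [initPs, PySem.List.length_pySetD]

lemma read_set_self (ps : List Int) (i v : Int) (hi : 0 ≤ i) (hlen : i.toNat < ps.length) :
    PySem.List.pyGetD (PySem.List.pySetD ps i v) i 0 = v := by
  rw [PySem.List.pySetD_of_nonneg _ _ hi, PySem.List.pyGetD_of_nonneg _ _ hi]
  simp [List.getD, hlen]

lemma initPs_getD (n : Int) (hn : 4 ≤ n) (k : Nat) (hk1 : 1 ≤ k) (hk : k ≤ 3) :
    PySem.List.pyGetD (initPs n) (k : Int) 0 = G k := by
  have hl : (List.replicate (n + 1).toNat (0:Int)).length = (n+1).toNat := by simp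
  unfold initPs
  rw [show ((0:Int)) = ((0:Nat):Int) by norm_num, show ((1:Int)) = ((1:Nat):Int) by norm_num,
      show ((2:Int)) = ((2:Nat):Int) by norm_num, show ((3:Int)) = ((3:Nat):Int) by norm_num]
  simp only [PySem.List.pySetD_natCast]
  rw [PySem.List.pyGetD_natCast]
  interval_cases k <;>
    simp [List.getD, G, show (0:Int) < n by omega,
          show (2:Int) ≤ n by omega, show (3:Int) ≤ n by omega]

lemma inner_loop (i : Int) (hi : 4 ≤ i) (ps : List Int) :
    (PySem.List.pyRange 1 (PySem.Int.floordiv i 2 + 1) 1).foldl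
        (fun (st : Int × List Int) j =>
          let product := PySem.List.pyGetD st.2 j 0 * PySem.List.pyGetD st.2 (i - j) 0
          let sub := if st.1 < product then product else st.1
          (sub, PySem.List.pySetD st.2 i sub)) ((0 : Int), ps)
      = ((PySem.List.pyRange 1 (PySem.Int.floordiv i 2 + 1) 1).foldl
           (fun a j => if a < PySem.List.pyGetD ps j 0 * PySem.List.pyGetD ps (i-j) 0
                       then PySem.List.pyGetD ps j 0 * PySem.List.pyGetD ps (i-j) 0 else a) 0,
         PySem.List.pySetD ps i
           ((PySem.List.pyRange 1 (PySem.Int.floordiv i 2 + 1) 1).foldl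
           (fun a j => if a < PySem.List.pyGetD ps j 0 * PySem.List.pyGetD ps (i-j) 0
                       then PySem.List.pyGetD ps j 0 * PySem.List.pyGetD ps (i-j) 0 else a) 0)) := by
  have hd : PySem.Int.floordiv i 2 = i / 2 := PySem.Int.floordiv_eq_ediv_of_pos (by omega)
  have h2 : 2 ≤ i / 2 := by omega
  rw [hd, PySem.List.pyRange_one_cons (by omega : (1:Int) < i/2 + 1)]
  simp only [List.foldl_cons]
  exact inner_pair i (by omega) ps (PySem.List.pyRange 2 (i/2+1) 1)
      (if (0:Int) < PySem.List.pyGetD ps 1 0 * PySem.List.pyGetD ps (i-1) 0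
       then PySem.List.pyGetD ps 1 0 * PySem.List.pyGetD ps (i-1) 0 else 0)
      (fun j hj => by
        have hm := (PySem.List.mem_pyRange_one).mp hj
        have hj2 : j ≤ i / 2 := by omega
        refine ⟨by omega, by omega, by omega, by omega⟩)

lemma scalar_eq_G (i : Int) (hi : 4 ≤ i) (ps : List Int)
    (hread : ∀ k : Nat, 1 ≤ k → (k:Int) < i → PySem.List.pyGetD ps (k:Int) 0 = G k) :
    (PySem.List.pyRange 1 (PySem.Int.floordiv i 2 + 1) 1).foldl
        (fun a j => if a < PySem.List.pyGetD ps j 0 * PySem.List.pyGetD ps (i-j) 0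
                    then PySem.List.pyGetD ps j 0 * PySem.List.pyGetD ps (i-j) 0 else a) 0
      = G i.toNat := by
  have hd : PySem.Int.floordiv i 2 = i / 2 := PySem.Int.floordiv_eq_ediv_of_pos (by omega)
  have hget : ∀ j : Int, 1 ≤ j → j ≤ i / 2 →
      PySem.List.pyGetD ps j 0 * PySem.List.pyGetD ps (i-j) 0 = G j.toNat * G (i.toNat - j.toNat) := by
    intro j h1 h2
    obtain ⟨a, rfl⟩ : ∃ a : Nat, (a:Int) = j := ⟨j.toNat, by omega⟩
    have hij' : (((i - (a:Int)).toNat : Int)) = i - (a:Int) := by omega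
    rw [hread a (by omega) (by omega), ← hij',
        hread (i - (a:Int)).toNat (by omega) (by omega)]
    have h3 : (i - (a:Int)).toNat = i.toNat - a := by omega
    rw [h3, Int.toNat_natCast]
  apply foldl_max_eq (fun j => PySem.List.pyGetD ps j 0 * PySem.List.pyGetD ps (i-j) 0)
  · exact le_of_lt (G_pos _)
  · intro j hj
    have hm := (PySem.List.mem_pyRange_one).mp hj
    rw [hd] at hm
    rw [hget j (by omega) (by omega)]
    exact G_bound i.toNat j.toNat (by omega) (by omega)
  · obtain ⟨w, hw1, hw2, hw3⟩ := G_achieve i.toNat (by omega)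
    refine ⟨(w : Int), ?_, ?_⟩
    · rw [PySem.List.mem_pyRange_one, hd]; omega
    · rw [hget (w:Int) (by omega) (by omega)]
      have h1 : ((w:Int)).toNat = w := by omega
      rw [h1]
      exact hw3

lemma outer_inv (n : Int) (hn : 4 ≤ n) :
    ∀ (m : Nat), 4 + (m:Int) ≤ n + 1 →
      ((PySem.List.pyRange 4 (4 + (m:Int)) 1).foldl (fun ps i =>
        ((PySem.List.pyRange 1 (PySem.Int.floordiv i 2 + 1) 1).foldl
          (fun (st : Int × List Int) j =>
            let product := PySem.List.pyGetD st.2 j 0 * PySem.List.pyGetD st.2 (i - j) 0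
            let sub := if st.1 < product then product else st.1
            (sub, PySem.List.pySetD st.2 i sub))
          ((0 : Int), ps)).2) (initPs n)).length = (n+1).toNat ∧
      ∀ k : Nat, 1 ≤ k → (k:Int) < 4 + (m:Int) →
        PySem.List.pyGetD ((PySem.List.pyRange 4 (4 + (m:Int)) 1).foldl (fun ps i =>
          ((PySem.List.pyRange 1 (PySem.Int.floordiv i 2 + 1) 1).foldl
            (fun (st : Int × List Int) j =>
              let product := PySem.List.pyGetD st.2 j 0 * PySem.List.pyGetD st.2 (i - j) 0
              let sub := if st.1 < product then product else st.1
              (sub, PySem.List.pySetD st.2 i sub))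
            ((0 : Int), ps)).2) (initPs n)) (k:Int) 0 = G k := by
  intro m
  induction m with
  | zero =>
    intro _
    rw [show ((4:Int) + ((0:Nat):Int)) = 4 by norm_num,
        PySem.List.pyRange_one_eq_nil (le_refl (4:Int))]
    simp only [List.foldl_nil]
    exact ⟨length_initPs n, fun k hk1 hk2 => initPs_getD n hn k hk1 (by omega)⟩
  | succ m ih =>
    intro hm
    have hcast : ((4:Int) + ((m+1 : Nat):Int)) = (4 + (m:Int)) + 1 := by push_cast; ring
    have hle : (4:Int) ≤ 4 + (m:Int) := by omega
    obtain ⟨ihlen, ihget⟩ := ih (by omega)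
    rw [hcast, PySem.List.pyRange_one_succ_right hle, List.foldl_append]
    constructor
    · simp only [List.foldl_cons, List.foldl_nil]
      rw [inner_loop (4 + (m:Int)) (by omega)]
      rw [PySem.List.length_pySetD]
      exact ihlen
    · intro k hk1 hk2
      simp only [List.foldl_cons, List.foldl_nil]
      rw [inner_loop (4 + (m:Int)) (by omega)]
      set ps := (PySem.List.pyRange 4 (4 + (m:Int)) 1).foldl (fun ps i =>
        ((PySem.List.pyRange 1 (PySem.Int.floordiv i 2 + 1) 1).foldl
          (fun (st : Int × List Int) j =>
            let product := PySem.List.pyGetD st.2 j 0 * PySem.List.pyGetD st.2 (i - j) 0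
            let sub := if st.1 < product then product else st.1
            (sub, PySem.List.pySetD st.2 i sub))
          ((0 : Int), ps)).2) (initPs n) with hps
      have hM := scalar_eq_G (4 + (m:Int)) (by omega) ps ihget
      rw [hM]
      by_cases hk : (k:Int) = 4 + (m:Int)
      · rw [hk, read_set_self ps _ _ (by omega) (by rw [ihlen]; omega)]
        congr 1
        omega
      · rw [read_set_ne ps _ _ _ (by omega) (by omega) hk]
        exact ihget k hk1 (by omega)

lemma cutRope_eq_G (n : Int) (hn : 4 ≤ n) : cutRope n = G n.toNat := by
  have h1 : ¬ n < 2 := by omega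
  have h2 : n ≠ 2 := by omega
  have h3 : n ≠ 3 := by omega
  unfold cutRope
  rw [if_neg h1, if_neg h2, if_neg h3]
  have hm : ((4:Int) + (((n-3).toNat : Nat) : Int)) = n + 1 := by omega
  have := (outer_inv n hn (n-3).toNat (by omega)).2 n.toNat (by omega) (by omega)
  rw [hm] at this
  rw [show ((n.toNat : Nat) : Int) = n by omega] at this
  exact this

lemma cutRope_alt_eq_G (n : Int) (hn : 4 ≤ n) : cutRope_alt n = G n.toNat := by
  have h1 : ¬ n < 2 := by omega
  have h2 : n ≠ 2 := by omega
  have h3 : n ≠ 3 := by omega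
  unfold cutRope_alt
  rw [if_neg h1, if_neg h2, if_neg h3]
  obtain ⟨t, rfl⟩ : ∃ t : Nat, ((t:Nat):Int) = n := ⟨n.toNat, by omega⟩
  have ht : 4 ≤ t := by omega
  have hq : PySem.Int.floordiv (t:Int) 3 = ((t/3 : Nat) : Int) := by
    exact_mod_cast PySem.Int.floordiv_natCast t 3
  have hr : PySem.Int.mod (t:Int) 3 = ((t%3 : Nat) : Int) := by
    exact_mod_cast PySem.Int.mod_natCast t 3
  simp only [hq, hr, Int.toNat_natCast]
  have hq1 : 1 ≤ t / 3 := by omega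
  rcases (show t % 3 = 0 ∨ t % 3 = 1 ∨ t % 3 = 2 by omega) with h | h | h <;>
    · simp only [h]
      norm_num
      unfold G
      simp [show t ≠ 1 by omega, h, show (((t/3:Nat):Int) - 1).toNat = t/3 - 1 by omega]
      try omega


-- ===== VERDICT (by name: the statement is the Claim_ definition above) =====
theorem cutRope_spec : Claim_equal_cutRope := by
  unfold Claim_equal_cutRope Spec_cutRope
  intro n _
  by_cases h1 : n < 2
  · simp [cutRope, cutRope_alt, h1]
  by_cases h2 : n = 2
  · subst h2; decide
  by_cases h3 : n = 3
  · subst h3; decide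
  rw [cutRope_eq_G n (by omega), cutRope_alt_eq_G n (by omega)]
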